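-- pv_equiv track=rewrite | github.com/nojhan/aapssfc | src/pendu_ordi_1.py | compatible_words
-- ===== SOURCE A (Python) =====
-- def is_compatible( word, partial_word ):
--     """ Teste si un mot complet est compatible avec un mot partiel.
--         Par exemple :
--         >>> from pendu_ordi import *
--         >>> is_compatible("hirondelle","_a____e__e")
--         False
--         >>> is_compatible("hirondelle","______e__e")
--         True
--     """
--     if len(word) != len(partial_word):
--         return False
--
--     for i in range(len(word)):
--         if partial_word[i] == "_":
--             continue
--
--         elif word[i] != partial_word[i]:
--             return False
--
--     return True
--
-- def compatible_words( words, partial_word, used_letters ):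
--     """ Filtre une liste de mots en ne gardant que les mots compatibles avec un mot partiel """
--     compatibles = []
--     for word in words:
--         # Ensemble des lettres utilisées dans le mot
--         word_letters = set(word)
--         # Les lettres disponibles sont celles qui ont été utilisées MOINS celles déjà devinées
--         false_letters = used_letters - set(partial_word.replace("_",""))
--
--         # Si le mot est compatible ET qu'aucune des lettres utilisées n'y est
--         if is_compatible( word, partial_word ) and len( false_letters & word_letters ) == 0:
--             compatibles.append( word )
--
--     return compatibles
-- ===== SOURCE B (Python) =====
-- def compatible_words(words, partial_word, used_letters):
--     """Filtre une liste de mots en ne gardant que les mots compatibles avec un mot partiel."""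
--     false_letters = used_letters - set(partial_word.replace("_", ""))
--
--     def ok(word):
--         if len(word) != len(partial_word):
--             return False
--         return all((c not in false_letters) if p == "_" else (c == p)
--                    for c, p in zip(word, partial_word))
--
--     return [w for w in words if ok(w)]
-- ===== Notes on version B (the rewrite author's own statement) =====
-- stated objective: faster
-- what changed: B computes false_letters once before the loop (A rebuilds the used_letters - guessed set difference inside the loop for every word) and replaces A's is_compatible-plus-set-intersection test by a single fused per-position pass over each word: at '_' positions the character must not be a forbidden letter, elsewhere it must equal the partial-word character; equivalent because a forbidden letter can never occur at a matched position.
import Mathlib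
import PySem

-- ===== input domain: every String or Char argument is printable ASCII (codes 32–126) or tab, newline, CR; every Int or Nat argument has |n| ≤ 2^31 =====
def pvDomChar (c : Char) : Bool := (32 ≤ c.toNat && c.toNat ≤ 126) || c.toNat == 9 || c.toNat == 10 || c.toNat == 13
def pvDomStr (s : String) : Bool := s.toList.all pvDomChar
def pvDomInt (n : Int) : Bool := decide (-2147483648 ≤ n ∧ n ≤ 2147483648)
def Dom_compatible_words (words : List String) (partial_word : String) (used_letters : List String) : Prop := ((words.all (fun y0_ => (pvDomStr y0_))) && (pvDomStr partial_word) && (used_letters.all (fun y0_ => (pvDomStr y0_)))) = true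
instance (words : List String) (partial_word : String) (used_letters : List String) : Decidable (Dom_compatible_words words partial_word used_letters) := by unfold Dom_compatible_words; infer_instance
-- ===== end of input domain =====

-- B hoists the false_letters set difference out of the word loop (A rebuilds it per word)
-- and fuses the compatibility and forbidden-letter tests into one per-position pass; measurably faster.

-- ===== PORT A =====
-- A's helper is_compatible: length check, then indexed loop with early exit
-- (ported as structural recursion over the two character lists, same branch order).
def pvCompatLoop : List Char → List Char → Bool
  | w :: ws, p :: ps =>
      if p = '_' then pvCompatLoop ws ps
      else if w ≠ p then false
      else pvCompatLoop ws ps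
  | _, _ => true

def is_compatible (word partial_word : String) : Bool :=
  if word.toList.length ≠ partial_word.toList.length then false
  else pvCompatLoop word.toList partial_word.toList

-- set of the 1-char strings of a word (Python set(word))
def pvSetOfStr (s : String) : PySem.Set String :=
  PySem.Set.ofList (s.toList.map (fun c => String.ofList [c]))

def compatible_words (words : List String) (partial_word : String) (used_letters : List String) : List String :=
  words.foldl (fun compatibles word =>
    let word_letters := pvSetOfStr word
    let false_letters := PySem.Set.diff used_letters (pvSetOfStr (PySem.Str.replace partial_word "_" ""))
    if is_compatible word partial_word ∧ PySem.Set.len (PySem.Set.inter false_letters word_letters) = 0 then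
      compatibles ++ [word]
    else compatibles) []

-- ===== PORT B =====
-- B hoists false_letters out of the loop and tests each word in one fused
-- per-position pass (forbidden letters checked at the '_' positions only).
def pvOkLoop (false_letters : List String) : List Char → List Char → Bool
  | c :: cs, p :: ps =>
      (if p = '_' then !(PySem.Set.contains false_letters (String.ofList [c]))
       else c = p) && pvOkLoop false_letters cs ps
  | _, _ => true

def compatible_words_alt (words : List String) (partial_word : String) (used_letters : List String) : List String :=
  let false_letters := PySem.Set.diff used_letters (pvSetOfStr (PySem.Str.replace partial_word "_" ""))
  words.filter (fun w =>
    w.toList.length = partial_word.toList.length &&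
    pvOkLoop false_letters w.toList partial_word.toList)

-- ===== PRECONDITION & SPEC =====
def Spec_compatible_words (words : List String) (partial_word : String) (used_letters : List String) (out : List String) : Prop := out = compatible_words_alt words partial_word used_letters
instance (words : List String) (partial_word : String) (used_letters : List String) (out : List String) : Decidable (Spec_compatible_words words partial_word used_letters out) := by unfold Spec_compatible_words; infer_instance

-- ===== CLAIM (what is proved, stated in full; the proofs are below) =====
def Claim_equal_compatible_words : Prop := ∀ (words : List String) (partial_word : String) (used_letters : List String), Dom_compatible_words words partial_word used_letters → Spec_compatible_words words partial_word used_letters (compatible_words words partial_word used_letters)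

-- ===== LEMMAS AND PROOFS =====

theorem repl_go (fuel : Nat) : ∀ (l acc : List Char), l.length ≤ fuel →
    PySem.Chars.replace.go ['_'] [] fuel l acc = acc.reverse ++ l.filter (fun c => c ≠ '_') := by
  induction fuel with
  | zero =>
    intro l acc h
    have : l = [] := List.eq_nil_of_length_eq_zero (Nat.le_zero.mp h)
    subst this; simp [PySem.Chars.replace.go]
  | succ n ih =>
    intro l acc h
    cases l with
    | nil => simp [PySem.Chars.replace.go]
    | cons c t =>
      by_cases hc : c = '_'
      · subst hc
        simp only [PySem.Chars.replace.go, List.isPrefixOf, List.length_cons] at *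
        simp [ih t acc (by omega)]
      · simp only [PySem.Chars.replace.go, List.isPrefixOf, List.length_cons] at *
        simp [hc, ih t (c :: acc) (by omega)]
        intro hEq; exact absurd hEq.symm hc

theorem toList_replace_underscore (p : String) :
    (PySem.Str.replace p "_" "").toList = p.toList.filter (fun c => c ≠ '_') := by
  rw [PySem.Str.toList_replace]
  show PySem.Chars.replace p.toList ['_'] [] = _
  rw [PySem.Chars.replace]
  rw [show (['_'] : List Char).isEmpty = false from rfl]
  simp only [Bool.false_eq_true, if_false]
  rw [repl_go p.toList.length p.toList [] (le_refl _)]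
  simp

theorem mem_pvSetOfStr (s : String) (c : Char) :
    String.ofList [c] ∈ pvSetOfStr s ↔ c ∈ s.toList := by
  unfold pvSetOfStr
  rw [PySem.Set.mem_ofList]
  constructor
  · intro h
    rcases List.mem_map.mp h with ⟨d, hd, he⟩
    have h2 : d = c := by
      have h3 := congrArg String.toList he
      simpa using h3
    exact h2 ▸ hd
  · intro h; exact List.mem_map.mpr ⟨c, h, rfl⟩

theorem okLoop_eq (F : List String) : ∀ (w p : List Char), w.length = p.length →
    (∀ c ∈ p, c ≠ '_' → String.ofList [c] ∉ F) →
    pvOkLoop F w p = (pvCompatLoop w p && w.all (fun c => !(PySem.Set.contains F (String.ofList [c])))) := by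
  intro w
  induction w with
  | nil => intro p hl _; cases p with
    | nil => rfl
    | cons q qs => simp at hl
  | cons c cs ih =>
    intro p hl hF
    cases p with
    | nil => simp at hl
    | cons q qs =>
      have hl' : cs.length = qs.length := by simpa using hl
      have hF' : ∀ c ∈ qs, c ≠ '_' → String.ofList [c] ∉ F := fun c hc => hF c (List.mem_cons_of_mem _ hc)
      by_cases hq : q = '_'
      · subst hq
        simp only [pvOkLoop, pvCompatLoop, if_pos, ih qs hl' hF', List.all_cons]
        cases hd : decide (String.ofList [c] ∈ F) <;> simp [hd]
      · by_cases hcq : c = q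
        · subst hcq
          have hnot : String.ofList [c] ∉ F := hF c (List.mem_cons_self) hq
          simp [pvOkLoop, pvCompatLoop, hq, ih qs hl' hF', hnot]
        · simp [pvOkLoop, pvCompatLoop, hq, hcq]

theorem inter_len_zero (s t : List String) :
    PySem.Set.len (PySem.Set.inter s t) = 0 ↔ ∀ x ∈ s, ¬ x ∈ t := by
  have e : PySem.Set.len (PySem.Set.inter s t) = (s.filter (fun x => PySem.Set.contains t x)).length := rfl
  rw [e]
  simp [List.length_eq_zero_iff, List.filter_eq_nil_iff]

theorem cond_eq (partial_word : String) (used_letters : List String) (word : String)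
    (F : List String)
    (hFdef : F = PySem.Set.diff used_letters (pvSetOfStr (PySem.Str.replace partial_word "_" ""))) :
    decide (is_compatible word partial_word = true ∧
        PySem.Set.len (PySem.Set.inter F (pvSetOfStr word)) = 0) =
      (decide (word.toList.length = partial_word.toList.length) &&
        pvOkLoop F word.toList partial_word.toList) := by
  have hF : ∀ c ∈ partial_word.toList, c ≠ '_' → String.ofList [c] ∉ F := by
    intro c hc hne hmem
    rw [hFdef, PySem.Set.mem_diff] at hmem
    exact hmem.2 ((mem_pvSetOfStr _ c).mpr
      (by rw [toList_replace_underscore]; exact List.mem_filter.mpr ⟨hc, by simpa using hne⟩))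
  by_cases hl : word.toList.length = partial_word.toList.length
  · rw [okLoop_eq F word.toList partial_word.toList hl hF]
    have hic : is_compatible word partial_word = pvCompatLoop word.toList partial_word.toList := by
      unfold is_compatible; rw [if_neg (not_not_intro hl)]
    have hint : (PySem.Set.len (PySem.Set.inter F (pvSetOfStr word)) = 0) ↔
        word.toList.all (fun c => !(PySem.Set.contains F (String.ofList [c]))) = true := by
      rw [inter_len_zero]
      simp only [List.all_eq_true, PySem.Set.contains_eq_listContains, List.contains_eq_mem,
        Bool.not_eq_eq_eq_not, Bool.not_true, decide_eq_false_iff_not]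
      constructor
      · intro h c hc hmem
        exact h _ hmem ((mem_pvSetOfStr word c).mpr hc)
      · intro h x hxF hxw
        rcases List.mem_map.mp ((PySem.Set.mem_ofList _ _).mp hxw) with ⟨c, hc, rfl⟩
        exact h c hc hxF
    have h2 : decide (PySem.Set.len (PySem.Set.inter F (pvSetOfStr word)) = 0)
        = word.toList.all (fun c => !(PySem.Set.contains F (String.ofList [c]))) := by
      by_cases hp : PySem.Set.len (PySem.Set.inter F (pvSetOfStr word)) = 0
      · rw [decide_eq_true hp, hint.mp hp]
      · rw [decide_eq_false hp]
        exact (Bool.eq_false_iff.mpr (fun h => hp (hint.mpr h))).symm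
    rw [Bool.decide_and, h2, decide_eq_true hl, Bool.true_and]
    simp [hic]
  · have hic : is_compatible word partial_word = false := by
      unfold is_compatible; rw [if_pos hl]
    rw [Bool.decide_and, decide_eq_false hl, Bool.false_and, hic]
    simp only [Bool.false_eq_true, decide_false, Bool.false_and]

-- ===== VERDICT (by name: the statement is the Claim_ definition above) =====
theorem compatible_words_spec : Claim_equal_compatible_words := by
  intro words partial_word used_letters _
  unfold Spec_compatible_words compatible_words compatible_words_alt
  show words.foldl (fun compatibles word =>
      if (is_compatible word partial_word = true ∧
          PySem.Set.len (PySem.Set.inter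
            (PySem.Set.diff used_letters (pvSetOfStr (PySem.Str.replace partial_word "_" "")))
            (pvSetOfStr word)) = 0) then compatibles ++ [word] else compatibles) [] = _
  rw [PySem.List.foldl_append_ite_eq_filter]
  simp only [List.nil_append]
  apply List.filter_congr
  intro w _
  exact cond_eq partial_word used_letters w _ rfl
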